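-- pv_equiv track=rewrite | github.com/andy194673/joust | utils/check_turn_info.py | check_turn_type
-- ===== SOURCE A (Python) =====
-- def check_turn_act(act_seq, act, domain, slot):
-- 	'''
-- 	decide if a slot with act exists in a act_seq
-- 	e.g., slot=hotel_people, act=inform exists in act_seq='act_inform hotel_people act_reqt hotel_stars'
-- 	however, slot=hotel_people, act=reqt doest not exist in this act_seq because wrong act
-- 	'''
-- 	# turn into correct form
-- 	slot = '{}_{}'.format(domain, slot)
-- 	act = 'act_{}'.format(act)
--
-- 	# first check if slot and act exists
-- 	if slot not in act_seq:
-- 		return False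
-- 	if act not in act_seq:
-- 		return False
--
-- 	# check if its with correct act, if the slot belongs to that act, then there is no act token in interval seq
-- 	act_seq = act_seq.split()
-- 	act_idx = act_seq.index(act)
-- 	slot_idx = act_seq.index(slot)
-- 	if slot_idx < act_idx: # slot appears before act
-- 		return False
--
-- 	interval_seq = ' '.join(act_seq[act_idx+1: slot_idx])
-- 	if 'act_' in interval_seq: # exist other act in interval
-- 		return False
-- 	else:
-- 		return True
--
-- def check_turn_type(act_usr, act_sys, turn_domain, keySlot):
-- 	'''
-- 	decide turn type within a domain, either info, book, reqt or none (for general domain)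
-- 	check by some rules:
-- 		book: if usr informs any booking slot or if sys reqt any booking slot
-- 		reqt: if usr reqt any reqt slot or if sys inform any reqt slot
-- 	'''
-- 	if turn_domain in ['taxi', 'police', 'hospital', 'general']:
-- 		return 'none'
--
-- 	# check book
-- 	if 'book' in keySlot[turn_domain]: # some domains have no booking stage
-- 		for slot in keySlot[turn_domain]['book']:
-- #			if checkActSlotInTurn(act_usr, 'inform', turn_domain, slot) or checkActSlotInTurn(act_sys, 'request', turn_domain, slot):
-- 			if check_turn_act(act_usr, 'inform', turn_domain, slot) or 'act_offerbooked' in act_sys: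
-- 				return 'book'
--
-- 	# check reqt
-- 	for slot in keySlot[turn_domain]['reqt']:
-- 		if check_turn_act(act_usr, 'request', turn_domain, slot) or check_turn_act(act_sys, 'inform', turn_domain, slot):
-- 			return 'reqt'
--
-- 	# else
-- 	return 'info'
-- ===== SOURCE B (Python) =====
-- def _slot_has_act(act_seq, act_tok, slot_tok):
--     """One linear scan over the tokens: record the first occurrence of slot_tok and
--     act_tok, and flag any other 'act_'-bearing token seen after the act and before
--     the slot.  No index arithmetic, slicing or re-joining."""
--     if slot_tok not in act_seq:
--         return False
--     if act_tok not in act_seq: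
--         return False
--     si = ai = None
--     blocked = False
--     for i, t in enumerate(act_seq.split()):
--         if si is None and t == slot_tok:
--             si = i
--         if ai is None and t == act_tok:
--             ai = i
--         elif si is None and ai is not None and 'act_' in t:
--             blocked = True
--     return si is not None and ai is not None and ai <= si and not blocked
--
--
-- def check_turn_type(act_usr, act_sys, turn_domain, keySlot):
--     if turn_domain in ('taxi', 'police', 'hospital', 'general'):
--         return 'none'
--     entry = keySlot[turn_domain]
--     offer = 'act_offerbooked' in act_sys
--     for slot in entry.get('book', ()):
--         if offer or _slot_has_act(act_usr, 'act_inform', turn_domain + '_' + slot):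
--             return 'book'
--     for slot in entry['reqt']:
--         if _slot_has_act(act_usr, 'act_request', turn_domain + '_' + slot) or \
--            _slot_has_act(act_sys, 'act_inform', turn_domain + '_' + slot):
--             return 'reqt'
--     return 'info'
-- ===== Notes on version B (the rewrite author's own statement) =====
-- stated objective: alternative
-- what changed: B replaces A's per-slot split/.index/.index/slice/join/substring pipeline by a single linear scan of the token list with a small state machine (first slot index, first act index, blocked flag), and hoists the act_offerbooked test out of the per-slot call; Pre_ excludes exactly the inputs where A raises (KeyError on a missing turn_domain/'reqt' key, ValueError from .index on a substring-but-not-token match that A actually evaluates).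
import Mathlib
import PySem

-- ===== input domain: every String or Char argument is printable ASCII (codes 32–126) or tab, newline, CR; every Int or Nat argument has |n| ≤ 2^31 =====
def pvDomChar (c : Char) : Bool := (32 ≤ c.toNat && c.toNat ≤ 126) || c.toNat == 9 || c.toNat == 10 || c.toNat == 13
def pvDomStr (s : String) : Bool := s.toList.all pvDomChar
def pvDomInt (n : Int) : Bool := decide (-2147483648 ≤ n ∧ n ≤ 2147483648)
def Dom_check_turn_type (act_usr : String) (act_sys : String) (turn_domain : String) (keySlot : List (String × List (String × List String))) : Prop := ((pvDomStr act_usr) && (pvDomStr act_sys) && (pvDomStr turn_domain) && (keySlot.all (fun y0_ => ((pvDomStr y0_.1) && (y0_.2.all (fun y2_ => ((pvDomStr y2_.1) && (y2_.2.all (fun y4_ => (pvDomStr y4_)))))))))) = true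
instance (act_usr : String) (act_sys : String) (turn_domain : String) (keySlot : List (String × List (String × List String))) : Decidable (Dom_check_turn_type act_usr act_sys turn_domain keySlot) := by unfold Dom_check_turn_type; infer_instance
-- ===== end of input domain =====

-- B replaces A's per-slot split/.index/slice/join pipeline by a single linear scan of the token
-- list with a three-field state machine (objective: alternative decomposition, same asymptotic cost);
-- equivalence is proved on Pre_, which excludes exactly the inputs where the Python A raises.

-- ===== PORT A =====
-- Python raises inside check_turn_act (ValueError from .index) and on missing dict keys; the
-- Option-valued helpers return none exactly there, and the top-level port returns "" in those
-- branches — Pre_check_turn_type excludes them, so the "" default is never reached on Pre_.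
def check_turn_act_A (act_seq : String) (act : String) (domain : String) (slot : String) : Option Bool :=
  let slot := domain ++ "_" ++ slot
  let act := "act_" ++ act
  if PySem.Str.isIn slot act_seq = false then some false
  else if PySem.Str.isIn act act_seq = false then some false
  else
    let toks := PySem.Str.split₀ act_seq
    match PySem.List.index? toks act with
    | none => none
    | some act_idx =>
      match PySem.List.index? toks slot with
      | none => none
      | some slot_idx =>
        if slot_idx < act_idx then some false
        else
          let interval := PySem.Str.join " " (PySem.List.slice toks (some ((act_idx : Int) + 1)) (some (slot_idx : Int)))
          if PySem.Str.isIn "act_" interval then some false else some true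

def bookLoop_A (act_usr : String) (act_sys : String) (turn_domain : String) : List String → Option Bool
  | [] => some false
  | s :: rest =>
    match check_turn_act_A act_usr "inform" turn_domain s with
    | none => none
    | some b =>
      if b || PySem.Str.isIn "act_offerbooked" act_sys then some true
      else bookLoop_A act_usr act_sys turn_domain rest

def reqtLoop_A (act_usr : String) (act_sys : String) (turn_domain : String) : List String → Option Bool
  | [] => some false
  | s :: rest =>
    match check_turn_act_A act_usr "request" turn_domain s with
    | none => none
    | some true => some true
    | some false =>
      match check_turn_act_A act_sys "inform" turn_domain s with
      | none => none
      | some true => some true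
      | some false => reqtLoop_A act_usr act_sys turn_domain rest

def check_turn_type (act_usr : String) (act_sys : String) (turn_domain : String) (keySlot : List (String × List (String × List String))) : String :=
  if turn_domain ∈ ["taxi", "police", "hospital", "general"] then "none"
  else
    match (PySem.Dict.mk keySlot).get? turn_domain with
    | none => ""
    | some entry =>
      let d := PySem.Dict.mk entry
      let bookRes := if d.contains "book" then bookLoop_A act_usr act_sys turn_domain (d.getD "book" []) else some false
      match bookRes with
      | none => ""
      | some true => "book"
      | some false =>
        match d.get? "reqt" with
        | none => ""
        | some reqts =>
          match reqtLoop_A act_usr act_sys turn_domain reqts with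
          | none => ""
          | some true => "reqt"
          | some false => "info"

-- ===== PORT B =====
-- One step of B's state machine: state = (position, first slot index?, first act index?, blocked flag).
def scanStep (slot_tok act_tok : String) (st : Nat × Option Nat × Option Nat × Bool) (t : String) : Nat × Option Nat × Option Nat × Bool :=
  let i := st.1
  let si := st.2.1
  let ai := st.2.2.1
  let blocked := st.2.2.2
  let si' := if si.isNone && (t == slot_tok) then some i else si
  if ai.isNone && (t == act_tok) then (i + 1, si', some i, blocked)
  else if si'.isNone && ai.isSome && PySem.Str.isIn "act_" t then (i + 1, si', ai, true)
  else (i + 1, si', ai, blocked)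

def slot_has_act_B (act_seq : String) (act_tok : String) (slot_tok : String) : Bool :=
  if PySem.Str.isIn slot_tok act_seq = false then false
  else if PySem.Str.isIn act_tok act_seq = false then false
  else
    let r := (PySem.Str.split₀ act_seq).foldl (scanStep slot_tok act_tok) (0, none, none, false)
    match r.2.1, r.2.2.1 with
    | some si, some ai => decide (ai ≤ si) && !r.2.2.2
    | _, _ => false

def check_turn_type_alt (act_usr : String) (act_sys : String) (turn_domain : String) (keySlot : List (String × List (String × List String))) : String :=
  if turn_domain ∈ ["taxi", "police", "hospital", "general"] then "none"
  else
    match (PySem.Dict.mk keySlot).get? turn_domain with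
    | none => ""  -- Python raises KeyError here; outside Pre_
    | some entry =>
      let d := PySem.Dict.mk entry
      let offer := PySem.Str.isIn "act_offerbooked" act_sys
      if (d.getD "book" []).any (fun s => offer || slot_has_act_B act_usr "act_inform" (turn_domain ++ "_" ++ s)) then "book"
      else
        match d.get? "reqt" with
        | none => ""  -- Python raises KeyError here; outside Pre_
        | some reqts =>
          if reqts.any (fun s => slot_has_act_B act_usr "act_request" (turn_domain ++ "_" ++ s)
                              || slot_has_act_B act_sys "act_inform" (turn_domain ++ "_" ++ s)) then "reqt"
          else "info"

-- ===== PRECONDITION & SPEC =====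
-- Declarative (index-based, fold-free) statement of "slot s carries act in seq": both tokens occur,
-- the first act occurrence is at or before the first slot occurrence, and no 'act_'-bearing token
-- lies strictly between them.  Used only to state Pre_; proved equal to both ports' computations below.
def blkSpec (T : List String) (a : Nat) (s : Nat) : Bool :=
  (List.range T.length).any fun k => decide (a < k) && decide (k < s) && PySem.Str.isIn "act_" (T.getD k "")

def slotHitSpec (seq : String) (act_tok : String) (slot_tok : String) : Bool :=
  PySem.Str.isIn slot_tok seq && PySem.Str.isIn act_tok seq &&
  (match PySem.List.index? (PySem.Str.split₀ seq) act_tok, PySem.List.index? (PySem.Str.split₀ seq) slot_tok with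
   | some a, some s => decide (a ≤ s) && !blkSpec (PySem.Str.split₀ seq) a s
   | _, _ => false)

-- A's check_turn_act raises ValueError exactly when a token passes the substring guards without
-- occurring as a whole token; safeAct says that does not happen.
def safeAct (seq : String) (act_tok : String) (slot_tok : String) : Bool :=
  !(PySem.Str.isIn slot_tok seq && PySem.Str.isIn act_tok seq) ||
  ((PySem.Str.split₀ seq).contains act_tok && (PySem.Str.split₀ seq).contains slot_tok)

def bookHit (act_usr : String) (act_sys : String) (td : String) (s : String) : Bool :=
  slotHitSpec act_usr "act_inform" (td ++ "_" ++ s) || PySem.Str.isIn "act_offerbooked" act_sys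

def reqtHit (act_usr : String) (act_sys : String) (td : String) (s : String) : Bool :=
  slotHitSpec act_usr "act_request" (td ++ "_" ++ s) || slotHitSpec act_sys "act_inform" (td ++ "_" ++ s)

-- a reqt slot is evaluated without raising iff the usr check is safe and, unless it already hits,
-- the sys check is safe too (Python short-circuits the 'or')
def reqtSafe (act_usr : String) (act_sys : String) (td : String) (s : String) : Bool :=
  safeAct act_usr "act_request" (td ++ "_" ++ s) &&
  (slotHitSpec act_usr "act_request" (td ++ "_" ++ s) || safeAct act_sys "act_inform" (td ++ "_" ++ s))

-- every slot scanned before the first hit must be safe (later slots are never evaluated by A)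
def scanOK (hit : String → Bool) (safe : String → Bool) (l : List String) : Prop :=
  ∀ i, i < l.length → (∀ j, j < i → hit (l.getD j "") = false) → safe (l.getD i "") = true

-- Pre_ excludes exactly the inputs on which the Python A raises: a missing turn_domain key, a
-- missing 'reqt' key when the reqt stage is reached, or a ValueError from .index on a slot/act
-- check that A actually evaluates before returning.
def Pre_check_turn_type (act_usr : String) (act_sys : String) (turn_domain : String) (keySlot : List (String × List (String × List String))) : Prop :=
  turn_domain ∈ ["taxi", "police", "hospital", "general"] ∨
  ((PySem.Dict.mk keySlot).contains turn_domain = true ∧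
   scanOK (bookHit act_usr act_sys turn_domain)
          (fun s => safeAct act_usr "act_inform" (turn_domain ++ "_" ++ s))
          ((PySem.Dict.mk ((PySem.Dict.mk keySlot).getD turn_domain [])).getD "book" []) ∧
   ((∀ s ∈ (PySem.Dict.mk ((PySem.Dict.mk keySlot).getD turn_domain [])).getD "book" [],
       bookHit act_usr act_sys turn_domain s = false) →
    ((PySem.Dict.mk ((PySem.Dict.mk keySlot).getD turn_domain [])).contains "reqt" = true ∧
     scanOK (reqtHit act_usr act_sys turn_domain)
            (reqtSafe act_usr act_sys turn_domain)
            ((PySem.Dict.mk ((PySem.Dict.mk keySlot).getD turn_domain [])).getD "reqt" []))))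
instance (act_usr : String) (act_sys : String) (turn_domain : String) (keySlot : List (String × List (String × List String))) : Decidable (Pre_check_turn_type act_usr act_sys turn_domain keySlot) := by unfold Pre_check_turn_type scanOK; infer_instance

def pvWitness_check_turn_type : String × String × String × (List (String × List (String × List String))) :=
  ("act_inform hotel_people", "act_request hotel_area", "hotel",
   [("hotel", [("book", ["people"]), ("reqt", ["area"])])])

def Spec_check_turn_type (act_usr : String) (act_sys : String) (turn_domain : String) (keySlot : List (String × List (String × List String))) (out : String) : Prop := out = check_turn_type_alt act_usr act_sys turn_domain keySlot
instance (act_usr : String) (act_sys : String) (turn_domain : String) (keySlot : List (String × List (String × List String))) (out : String) : Decidable (Spec_check_turn_type act_usr act_sys turn_domain keySlot out) := by unfold Spec_check_turn_type; infer_instance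

-- ===== CLAIM (what is proved, stated in full; the proofs are below) =====
def Claim_equal_check_turn_type : Prop := ∀ (act_usr : String) (act_sys : String) (turn_domain : String) (keySlot : List (String × List (String × List String))), Dom_check_turn_type act_usr act_sys turn_domain keySlot → Pre_check_turn_type act_usr act_sys turn_domain keySlot → Spec_check_turn_type act_usr act_sys turn_domain keySlot (check_turn_type act_usr act_sys turn_domain keySlot)

-- ===== LEMMAS AND PROOFS =====

lemma index?_append_singleton (T : List String) (t x : String) :
    PySem.List.index? (T ++ [t]) x
      = (PySem.List.index? T x).or (if t = x then some T.length else none) := by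
  have h1 : List.findIdx? (fun y => y == x) [t] = if t = x then some 0 else none := by
    by_cases h : t = x <;> simp [List.findIdx?_cons, h]
  simp only [PySem.List.index?, List.idxOf?, List.findIdx?_append, h1]
  by_cases h : t = x <;> simp [h]

lemma scanStep_eq (slot_tok act_tok : String) (i : Nat) (si ai : Option Nat) (bl : Bool) (t : String) :
    scanStep slot_tok act_tok (i, si, ai, bl) t
      = (i + 1,
         (if si.isNone && (t == slot_tok) then some i else si),
         ai.or (if t = act_tok then some i else none),
         bl || ((if si.isNone && (t == slot_tok) then some i else si).isNone
                 && ai.isSome && PySem.Str.isIn "act_" t)) := by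
  cases ai with
  | none =>
    by_cases ht : t = act_tok
    · simp [scanStep, ht]
    · simp only [scanStep, Option.isNone_none, Bool.true_and, beq_iff_eq, ht, if_false,
        Option.or_none, Option.isSome_none, Bool.and_false, Bool.false_and, Bool.or_false]
      simp [ht]
  | some a =>
    cases si with
    | none =>
      by_cases hs : t = slot_tok
      · simp [scanStep, hs, Option.or]
      · cases hIn : PySem.Chars.isIn ['a','c','t','_'] t.toList <;> simp [scanStep, hs, hIn, PySem.Str.isIn_eq, Option.or]
    | some s0 => cases hIn : PySem.Chars.isIn ['a','c','t','_'] t.toList <;> simp [scanStep, hIn, PySem.Str.isIn_eq, Option.or]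

lemma any_congr_mem {α : Type} (l : List α) (p q : α → Bool) (h : ∀ a ∈ l, p a = q a) :
    l.any p = l.any q := by
  induction l with
  | nil => rfl
  | cons x xs ih => simp only [List.any_cons, h x (by simp), ih (fun a ha => h a (by simp [ha]))]

lemma index?_lt_length (T : List String) (x : String) (a : Nat) (h : PySem.List.index? T x = some a) :
    a < T.length := by
  have := List.idxOf?_eq_some_iff.mp (h : List.idxOf? x T = some a)
  exact this.1

lemma if_or_form (o : Option Nat) (c : Bool) (v : Nat) :
    (if o.isNone && c then some v else o) = o.or (if c then some v else none) := by
  cases o <;> cases c <;> simp [Option.or]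

def blkFull (act_tok slot_tok : String) (T : List String) : Bool :=
  (List.range T.length).any fun k =>
    (match PySem.List.index? T act_tok with | some a => decide (a < k) | none => false) &&
    (match PySem.List.index? T slot_tok with | some s => decide (k < s) | none => true) &&
    PySem.Str.isIn "act_" (T.getD k "")

lemma blkFull_append (act_tok slot_tok t : String) (T : List String) :
    blkFull act_tok slot_tok (T ++ [t])
      = (blkFull act_tok slot_tok T
         || ((PySem.List.index? (T ++ [t]) slot_tok).isNone
             && (PySem.List.index? T act_tok).isSome && PySem.Str.isIn "act_" t)) := by
  unfold blkFull
  rw [List.length_append, List.length_singleton, List.range_succ, List.any_append]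
  simp only [List.any_cons, List.any_nil, Bool.or_false]
  congr 1
  · apply any_congr_mem
    intro k hk
    rw [List.mem_range] at hk
    have hgetD : (T ++ [t]).getD k "" = T.getD k "" := by
      simp [List.getD_eq_getElem?_getD, List.getElem?_append, hk]
    rw [hgetD, index?_append_singleton, index?_append_singleton]
    have hnk : ¬ (T.length < k) := by omega
    cases ha : PySem.List.index? T act_tok <;>
      cases hs : PySem.List.index? T slot_tok <;>
      by_cases hta : t = act_tok <;>
      by_cases hts : t = slot_tok <;>
      by_cases hsa : slot_tok = act_tok <;>
      simp_all [Option.or]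
  · rw [index?_append_singleton, index?_append_singleton]
    have hgetD : (T ++ [t]).getD T.length "" = t := by
      simp [List.getD_eq_getElem?_getD, List.getElem?_append]
    rw [hgetD]
    cases ha : PySem.List.index? T act_tok with
    | some a =>
      have h1 := index?_lt_length T act_tok a ha
      cases hs : PySem.List.index? T slot_tok with
      | some s =>
        have h2 := index?_lt_length T slot_tok s hs
        have h3 : ¬ (T.length < s) := by omega
        simp [Option.or, h1, h3]
      | none => by_cases hts : t = slot_tok <;> simp [Option.or, hts, h1]
    | none =>
      by_cases hta : t = act_tok <;>
        cases hs : PySem.List.index? T slot_tok <;>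
        by_cases hts : t = slot_tok <;>
        by_cases hsa : slot_tok = act_tok <;>
        simp_all [Option.or]

lemma scan_foldl (slot_tok act_tok : String) (T : List String) :
    T.foldl (scanStep slot_tok act_tok) (0, none, none, false)
      = (T.length, PySem.List.index? T slot_tok, PySem.List.index? T act_tok,
         blkFull act_tok slot_tok T) := by
  induction T using List.reverseRecOn with
  | nil => simp [PySem.List.index?, blkFull]
  | append_singleton T t ih =>
    rw [List.foldl_append, ih, List.foldl_cons, List.foldl_nil, scanStep_eq]
    rw [if_or_form]
    have hbeq : ((t == slot_tok) : Bool) = decide (t = slot_tok) := by rfl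
    rw [blkFull_append, index?_append_singleton, index?_append_singleton]
    simp [hbeq]

-- B's per-slot check computes the declarative predicate (no precondition needed)
lemma slot_has_act_B_eq (seq act_tok slot_tok : String) :
    slot_has_act_B seq act_tok slot_tok = slotHitSpec seq act_tok slot_tok := by
  unfold slot_has_act_B slotHitSpec
  cases h1 : PySem.Str.isIn slot_tok seq with
  | false => simp [h1]
  | true =>
    cases h2 : PySem.Str.isIn act_tok seq with
    | false => simp [h2]
    | true =>
      simp only [h1, h2, Bool.true_and, Bool.true_eq_false, if_false, if_neg]
      rw [scan_foldl]
      cases ha : PySem.List.index? (PySem.Str.split₀ seq) act_tok <;>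
        cases hs : PySem.List.index? (PySem.Str.split₀ seq) slot_tok <;>
        simp only [PySem.List.index?] at ha hs <;>
        simp [ha, hs, blkFull, blkSpec, PySem.List.index?]

-- 'act_' cannot straddle a ' ' separator: infix of an append around a char not in sub
lemma infix_append_cons (sub : List Char) (c : Char) (hc : c ∉ sub) :
    ∀ (a b : List Char), sub <:+: a ++ c :: b → sub <:+: a ∨ sub <:+: b := by
  intro a
  induction a with
  | nil =>
    intro b h
    rw [List.nil_append, List.infix_cons_iff] at h
    rcases h with h | h
    · cases sub with
      | nil => exact Or.inl List.nil_infix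
      | cons s0 tl =>
        rw [List.cons_prefix_cons] at h
        exact absurd (h.1 ▸ List.mem_cons_self) hc
    · exact Or.inr h
  | cons x a' ih =>
    intro b h
    rw [List.cons_append, List.infix_cons_iff] at h
    rcases h with h | h
    · have hEq : x :: (a' ++ c :: b) = (x :: a') ++ c :: b := by simp
      rw [hEq] at h
      by_cases hl : sub.length ≤ (x :: a').length
      · have h2 : sub <+: ((x :: a') ++ c :: b).take (x :: a').length :=
          List.prefix_take_iff.mpr ⟨h, hl⟩
        rw [List.take_left] at h2
        exact Or.inl h2.isInfix
      · exfalso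
        have hlen : (x :: a').length < sub.length := by omega
        have hg := h.getElem hlen
        have hr : ((x :: a') ++ c :: b)[(x :: a').length]'(by simp) = c := by
          rw [List.getElem_append_right (le_refl _)]
          simp
        have hm := List.getElem_mem hlen
        rw [hg] at hm
        exact hc (hr ▸ hm)
    · rcases ih b h with h' | h'
      · exact Or.inl (h'.trans (List.suffix_cons x a').isInfix)
      · exact Or.inr h'

lemma infix_intercalate_iff (sub : List Char) (hne : sub ≠ []) (hsp : ' ' ∉ sub) :
    ∀ (L : List (List Char)), sub <:+: List.intercalate [' '] L ↔ ∃ x ∈ L, sub <:+: x := by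
  intro L
  induction L with
  | nil =>
    simp only [List.intercalate, List.intersperse, List.flatten_nil, List.infix_nil]
    simp [hne]
  | cons x rest ih =>
    cases rest with
    | nil => simp [List.intercalate, List.intersperse]
    | cons y rest' =>
      have hstep : List.intercalate [' '] (x :: y :: rest')
          = x ++ ' ' :: List.intercalate [' '] (y :: rest') := by
        simp [List.intercalate, List.intersperse]
      rw [hstep]
      constructor
      · intro h
        rcases infix_append_cons sub ' ' hsp x (List.intercalate [' '] (y :: rest')) h with h' | h'
        · exact ⟨x, by simp, h'⟩
        · rcases ih.mp h' with ⟨z, hz, hsz⟩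
          exact ⟨z, by simp [hz], hsz⟩
      · rintro ⟨z, hz, hsz⟩
        rcases List.mem_cons.mp hz with rfl | hz'
        · exact hsz.trans ((List.prefix_append z _).isInfix)
        · have : sub <:+: List.intercalate [' '] (y :: rest') := ih.mpr ⟨z, hz', hsz⟩
          exact this.trans (((List.suffix_cons ' ' _).trans (List.suffix_append x _)).isInfix)

-- substring of a space-join = substring of some part
lemma isIn_join_space (sub : String) (hne : sub.toList ≠ []) (hsp : ' ' ∉ sub.toList) (L : List String) :
    PySem.Str.isIn sub (PySem.Str.join " " L) = L.any (fun x => PySem.Str.isIn sub x) := by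
  rw [Bool.eq_iff_iff]
  rw [PySem.Str.isIn_iff_infix, List.any_eq_true]
  rw [PySem.Str.toList_join]
  have hsep : (" " : String).toList = [' '] := rfl
  rw [hsep]
  rw [show PySem.Chars.join [' '] (L.map String.toList) = List.intercalate [' '] (L.map String.toList) from rfl]
  rw [infix_intercalate_iff sub.toList hne hsp]
  constructor
  · rintro ⟨z, hz, hsz⟩
    rcases List.mem_map.mp hz with ⟨w, hw, rfl⟩
    exact ⟨w, hw, (PySem.Str.isIn_iff_infix _ _).mpr hsz⟩
  · rintro ⟨w, hw, hsw⟩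
    exact ⟨w.toList, List.mem_map.mpr ⟨w, hw, rfl⟩, (PySem.Str.isIn_iff_infix _ _).mp hsw⟩

lemma any_window (T : List String) (P : String → Bool) (a si : Nat) (hsi : si ≤ T.length) :
    (List.take (si - (a + 1)) (List.drop (a + 1) T)).any P
      = (List.range T.length).any (fun k => decide (a < k) && decide (k < si) && P (T.getD k "")) := by
  rw [Bool.eq_iff_iff, List.any_eq_true, List.any_eq_true]
  constructor
  · rintro ⟨x, hx, hPx⟩
    rw [List.mem_iff_getElem] at hx
    obtain ⟨i, hi, hxi⟩ := hx
    rw [List.length_take, List.length_drop] at hi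
    have hk : a + 1 + i < T.length := by omega
    refine ⟨a + 1 + i, List.mem_range.mpr hk, ?_⟩
    have hx2 : (List.take (si - (a + 1)) (List.drop (a + 1) T))[i]'(by
        rw [List.length_take, List.length_drop]; omega) = T[a + 1 + i]'hk := by
      rw [List.getElem_take, List.getElem_drop]
    have hD : T.getD (a + 1 + i) "" = x := by
      rw [List.getD_eq_getElem?_getD, List.getElem?_eq_getElem hk, ← hx2, hxi]
      rfl
    rw [hD]
    have h1 : a < a + 1 + i := by omega
    have h2 : a + 1 + i < si := by omega
    simp [h1, h2, hPx]
  · rintro ⟨k, hk, hprop⟩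
    rw [List.mem_range] at hk
    simp only [Bool.and_eq_true, decide_eq_true_eq] at hprop
    obtain ⟨⟨hak, hks⟩, hP⟩ := hprop
    have hi : k - (a + 1) < (List.take (si - (a + 1)) (List.drop (a + 1) T)).length := by
      rw [List.length_take, List.length_drop]; omega
    refine ⟨_, List.getElem_mem hi, ?_⟩
    have hx2 : (List.take (si - (a + 1)) (List.drop (a + 1) T))[k - (a + 1)]'hi
        = T[k]'(by omega) := by
      rw [List.getElem_take, List.getElem_drop]
      congr 1
      omega
    rw [hx2]
    have hD : T.getD k "" = T[k]'(by omega) := by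
      rw [List.getD_eq_getElem?_getD, List.getElem?_eq_getElem (show k < T.length by omega)]
      rfl
    rw [hD] at hP
    exact hP

-- A's per-slot check returns the declarative predicate on safe inputs
lemma check_turn_act_A_eq (seq act domain s : String)
    (h : safeAct seq ("act_" ++ act) (domain ++ "_" ++ s) = true) :
    check_turn_act_A seq act domain s
      = some (slotHitSpec seq ("act_" ++ act) (domain ++ "_" ++ s)) := by
  unfold check_turn_act_A slotHitSpec
  dsimp only
  cases h1 : PySem.Str.isIn (domain ++ "_" ++ s) seq with
  | false => simp
  | true =>
    cases h2 : PySem.Str.isIn ("act_" ++ act) seq with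
    | false => simp
    | true =>
      unfold safeAct at h
      rw [h1, h2] at h
      simp only [Bool.and_self, Bool.not_true, Bool.false_or, Bool.and_eq_true,
        List.contains_eq_mem, decide_eq_true_eq] at h
      obtain ⟨hact, hslot⟩ := h
      have ha : PySem.List.index? (PySem.Str.split₀ seq) ("act_" ++ act) ≠ none := by
        rw [Ne, PySem.List.index?_eq_none_iff]
        simpa using hact
      have hs : PySem.List.index? (PySem.Str.split₀ seq) (domain ++ "_" ++ s) ≠ none := by
        rw [Ne, PySem.List.index?_eq_none_iff]
        simpa using hslot
      simp only [h1, Bool.true_eq_false, if_false, Bool.true_and]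
      obtain ⟨a, hA⟩ := Option.ne_none_iff_exists'.mp ha
      obtain ⟨si, hS⟩ := Option.ne_none_iff_exists'.mp hs
      simp only [hA, hS]
      · by_cases hlt : si < a
        · have hnle : ¬ (a ≤ si) := by omega
          simp [hlt, hnle]
        · have hle : a ≤ si := by omega
          rw [if_neg hlt]
          have hcast : ((a : Int) + 1) = ((a + 1 : Nat) : Int) := by push_cast; ring
          rw [hcast, PySem.List.slice_natCast]
          have hsilen := index?_lt_length _ _ _ hS
          rw [isIn_join_space "act_" (by decide) (by decide)]
          rw [any_window _ _ a si (le_of_lt hsilen)]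
          rw [show blkSpec (PySem.Str.split₀ seq) a si
              = (List.range (PySem.Str.split₀ seq).length).any
                  (fun k => decide (a < k) && decide (k < si)
                    && PySem.Str.isIn "act_" ((PySem.Str.split₀ seq).getD k "")) from rfl]
          cases hblk : (List.range (PySem.Str.split₀ seq).length).any
              (fun k => decide (a < k) && decide (k < si)
                && PySem.Str.isIn "act_" ((PySem.Str.split₀ seq).getD k "")) <;>
            simp [hle]

lemma act_inform_eq : ("act_" ++ "inform" : String) = "act_inform" := rfl
lemma act_request_eq : ("act_" ++ "request" : String) = "act_request" := rfl

lemma bookLoop_A_eq (act_usr act_sys td : String) (l : List String)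
    (h : scanOK (bookHit act_usr act_sys td) (fun s => safeAct act_usr "act_inform" (td ++ "_" ++ s)) l) :
    bookLoop_A act_usr act_sys td l = some (l.any (bookHit act_usr act_sys td)) := by
  induction l with
  | nil => rfl
  | cons x xs ih =>
    have hsafe : safeAct act_usr "act_inform" (td ++ "_" ++ x) = true := by
      have := h 0 (by simp) (by intro j hj; omega)
      simpa using this
    have heq : check_turn_act_A act_usr "inform" td x
        = some (slotHitSpec act_usr "act_inform" (td ++ "_" ++ x)) := by
      have h2 := check_turn_act_A_eq act_usr "inform" td x (by rw [act_inform_eq]; exact hsafe)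
      rw [act_inform_eq] at h2
      exact h2
    rw [bookLoop_A, heq]
    cases hh : slotHitSpec act_usr "act_inform" (td ++ "_" ++ x) with
    | true => simp [List.any_cons, bookHit, hh]
    | false =>
      cases ho : PySem.Chars.isIn ['a','c','t','_','o','f','f','e','r','b','o','o','k','e','d'] act_sys.toList with
      | true => simp [List.any_cons, bookHit, hh, ho, PySem.Str.isIn_eq]
      | false =>
        rw [ih ?_]
        · simp [List.any_cons, bookHit, hh, ho, PySem.Str.isIn_eq]
        · intro i hi hstep
          have := h (i + 1) (by simp only [List.length_cons]; omega) ?_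
          · simpa using this
          · intro j hj
            cases j with
            | zero => simp [bookHit, hh, ho, PySem.Str.isIn_eq]
            | succ j' => simpa using hstep j' (by omega)

lemma reqtLoop_A_eq (act_usr act_sys td : String) (l : List String)
    (h : scanOK (reqtHit act_usr act_sys td) (reqtSafe act_usr act_sys td) l) :
    reqtLoop_A act_usr act_sys td l = some (l.any (reqtHit act_usr act_sys td)) := by
  induction l with
  | nil => rfl
  | cons x xs ih =>
    have hsafe : reqtSafe act_usr act_sys td x = true := by
      have := h 0 (by simp) (by intro j hj; omega)
      simpa using this
    unfold reqtSafe at hsafe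
    rw [Bool.and_eq_true] at hsafe
    have hequ : check_turn_act_A act_usr "request" td x
        = some (slotHitSpec act_usr "act_request" (td ++ "_" ++ x)) := by
      have h2 := check_turn_act_A_eq act_usr "request" td x
        (by rw [act_request_eq]; exact hsafe.1)
      rw [act_request_eq] at h2
      exact h2
    rw [reqtLoop_A, hequ]
    cases hu : slotHitSpec act_usr "act_request" (td ++ "_" ++ x) with
    | true => simp [List.any_cons, reqtHit, hu]
    | false =>
      have hsafes : safeAct act_sys "act_inform" (td ++ "_" ++ x) = true := by
        rcases Bool.or_eq_true_iff.mp hsafe.2 with h' | h'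
        · rw [hu] at h'; exact absurd h' (by simp)
        · exact h'
      have heqs : check_turn_act_A act_sys "inform" td x
          = some (slotHitSpec act_sys "act_inform" (td ++ "_" ++ x)) := by
        have h2 := check_turn_act_A_eq act_sys "inform" td x
          (by rw [act_inform_eq]; exact hsafes)
        rw [act_inform_eq] at h2
        exact h2
      rw [heqs]
      cases hs : slotHitSpec act_sys "act_inform" (td ++ "_" ++ x) with
      | true => simp [List.any_cons, reqtHit, hu, hs]
      | false =>
        rw [ih ?_]
        · simp [List.any_cons, reqtHit, hu, hs]
        · intro i hi hstep
          have hlen : i + 1 < (x :: xs).length := by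
            rw [List.length_cons]
            omega
          have := h (i + 1) hlen ?_
          · simpa using this
          · intro j hj
            cases j with
            | zero => simp [reqtHit, hu, hs]
            | succ j' => simpa using hstep j' (by omega)

-- ===== VERDICT (by name: the statement is the Claim_ definition above) =====
theorem check_turn_type_spec : Claim_equal_check_turn_type := by
  intro act_usr act_sys turn_domain keySlot _ hpre
  unfold Spec_check_turn_type check_turn_type check_turn_type_alt
  by_cases hsp : turn_domain ∈ ["taxi", "police", "hospital", "general"]
  · rw [if_pos hsp, if_pos hsp]
  rw [if_neg hsp, if_neg hsp]
  rcases hpre with hsp' | ⟨hcont, hbookOK, hrest⟩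
  · exact absurd hsp' hsp
  cases hget : (PySem.Dict.mk keySlot).get? turn_domain with
  | none => simp [PySem.Dict.contains_eq_isSome_get?, hget] at hcont
  | some entry =>
    have hentry : (PySem.Dict.mk keySlot).getD turn_domain [] = entry := by
      rw [PySem.Dict.getD_eq_get?_getD, hget]; rfl
    rw [hentry] at hbookOK hrest
    simp only []
    have hbookRes :
        (if (PySem.Dict.mk entry).contains "book" then
           bookLoop_A act_usr act_sys turn_domain ((PySem.Dict.mk entry).getD "book" [])
         else some false)
        = bookLoop_A act_usr act_sys turn_domain ((PySem.Dict.mk entry).getD "book" []) := by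
      cases hcb : (PySem.Dict.mk entry).contains "book" with
      | true => rw [if_pos rfl]
      | false =>
        have : (PySem.Dict.mk entry).getD "book" [] = [] := by
          rw [PySem.Dict.contains_eq_isSome_get?] at hcb
          rw [PySem.Dict.getD_eq_get?_getD]
          cases hgb : (PySem.Dict.mk entry).get? "book" with
          | none => rfl
          | some _ => rw [hgb] at hcb; simp at hcb
        rw [this]
        simp [bookLoop_A]
    rw [hbookRes, bookLoop_A_eq act_usr act_sys turn_domain _ hbookOK]
    have hBany :
        ((PySem.Dict.mk entry).getD "book" []).any
          (fun s => PySem.Str.isIn "act_offerbooked" act_sys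
            || slot_has_act_B act_usr "act_inform" (turn_domain ++ "_" ++ s))
        = ((PySem.Dict.mk entry).getD "book" []).any (bookHit act_usr act_sys turn_domain) := by
      apply any_congr_mem
      intro a _
      rw [slot_has_act_B_eq]
      unfold bookHit
      rw [Bool.or_comm]
    rw [hBany]
    cases hany : ((PySem.Dict.mk entry).getD "book" []).any (bookHit act_usr act_sys turn_domain) with
    | true => rfl
    | false =>
      dsimp only
      have hnohit : ∀ s ∈ (PySem.Dict.mk entry).getD "book" [],
          bookHit act_usr act_sys turn_domain s = false := by
        intro s hs
        have := List.any_eq_false.mp hany s hs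
        simpa using this
      obtain ⟨hcreqt, hreqtOK⟩ := hrest hnohit
      cases hr : (PySem.Dict.mk entry).get? "reqt" with
      | none => simp [PySem.Dict.contains_eq_isSome_get?, hr] at hcreqt
      | some reqts =>
        have hreqts : (PySem.Dict.mk entry).getD "reqt" [] = reqts := by
          rw [PySem.Dict.getD_eq_get?_getD, hr]; rfl
        rw [hreqts] at hreqtOK
        dsimp only
        rw [reqtLoop_A_eq act_usr act_sys turn_domain reqts hreqtOK]
        have hRany :
            reqts.any (fun s => slot_has_act_B act_usr "act_request" (turn_domain ++ "_" ++ s)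
              || slot_has_act_B act_sys "act_inform" (turn_domain ++ "_" ++ s))
            = reqts.any (reqtHit act_usr act_sys turn_domain) := by
          apply any_congr_mem
          intro a _
          rw [slot_has_act_B_eq, slot_has_act_B_eq]
          rfl
        rw [hRany]
        cases reqts.any (reqtHit act_usr act_sys turn_domain) <;> rfl
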